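-- pv_equiv track=rewrite | github.com/martydill/Wizardry-6-reverse-engineering | scratch/infer_block_layout_map0.py | best_shift
-- ===== SOURCE A (Python) =====
-- def best_shift(added):
--     target_h = {(0, 7), (0, 14), (16, 0), (17, 0), (18, 0), (19, 0), (16, 2), (17, 2), (18, 2), (19, 2)}
--     target_v = {(1, 7), (16, 0), (16, 1), (18, 0), (18, 1), (20, 0), (20, 1)}
--     best = (0, 0, -10**9)
--     for sx in range(-30, 31):
--         for sy in range(-30, 31):
--             hit = 0
--             miss = 0
--             for kind, x, y in added:
--                 tx, ty = x + sx, y + sy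
--                 if kind == "h":
--                     if (tx, ty) in target_h:
--                         hit += 1
--                     else:
--                         miss += 1
--                 else:
--                     if (tx, ty) in target_v:
--                         hit += 1
--                     else:
--                         miss += 1
--             s = hit * 10 - miss
--             if s > best[2]:
--                 best = (sx, sy, s)
--     return best
-- ===== SOURCE B (Python) =====
-- def best_shift(added):
--     target_h = [(0, 7), (0, 14), (16, 0), (17, 0), (18, 0), (19, 0), (16, 2), (17, 2), (18, 2), (19, 2)]
--     target_v = [(1, 7), (16, 0), (16, 1), (18, 0), (18, 1), (20, 0), (20, 1)]
--     counts = {}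
--     for kind, x, y in added:
--         for tx, ty in (target_h if kind == "h" else target_v):
--             sx, sy = tx - x, ty - y
--             if -30 <= sx <= 30 and -30 <= sy <= 30:
--                 counts[(sx, sy)] = counts.get((sx, sy), 0) + 1
--     if not counts:
--         return (-30, -30, -len(added))
--     h = max(counts.values())
--     sx, sy = min(k for k, v in counts.items() if v == h)
--     return (sx, sy, 11 * h - len(added))
-- ===== Notes on version B (the rewrite author's own statement) =====
-- stated objective: faster
-- what changed: Instead of scanning all 61x61 candidate shifts and re-counting hits for each (A), B generates candidate shifts directly from each (element, target point) pair, tallies them in a dict in one pass, and returns the lexicographically smallest shift with the maximal tally (falling back to (-30,-30) when no shift can hit), using score = 11*hits - len(added) since miss = len(added) - hits.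
import Mathlib
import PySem

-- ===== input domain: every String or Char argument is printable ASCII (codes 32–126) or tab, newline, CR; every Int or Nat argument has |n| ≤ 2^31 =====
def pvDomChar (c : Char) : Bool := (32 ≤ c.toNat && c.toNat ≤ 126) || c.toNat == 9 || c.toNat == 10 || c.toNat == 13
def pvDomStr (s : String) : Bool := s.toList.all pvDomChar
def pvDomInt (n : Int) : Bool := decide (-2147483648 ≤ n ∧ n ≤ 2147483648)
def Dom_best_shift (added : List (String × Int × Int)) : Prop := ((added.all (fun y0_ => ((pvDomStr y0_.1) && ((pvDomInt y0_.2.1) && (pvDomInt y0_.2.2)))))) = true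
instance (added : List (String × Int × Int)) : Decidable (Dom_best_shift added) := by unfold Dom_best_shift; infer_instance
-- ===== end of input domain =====

-- B replaces A's scan of all 61×61 shifts by generating candidate shifts directly from
-- added×target matches, tallying them in a dict and picking the lexicographically smallest
-- max-count shift (objective: faster — the fixed 3721-shift grid scan disappears).

-- ===== PORT A =====
def pvTargetH : PySem.Set (Int × Int) :=
  PySem.Set.ofList [(0,7),(0,14),(16,0),(17,0),(18,0),(19,0),(16,2),(17,2),(18,2),(19,2)]
def pvTargetV : PySem.Set (Int × Int) :=
  PySem.Set.ofList [(1,7),(16,0),(16,1),(18,0),(18,1),(20,0),(20,1)]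

def best_shift (added : List (String × Int × Int)) : Int × Int × Int :=
  (PySem.List.pyRange (-30) 31 1).foldl (fun best sx =>
    (PySem.List.pyRange (-30) 31 1).foldl (fun best sy =>
      let hm : Int × Int := added.foldl (fun hm e =>
        let t : Int × Int := (e.2.1 + sx, e.2.2 + sy)
        if e.1 == "h" then
          (if PySem.Set.contains pvTargetH t then (hm.1 + 1, hm.2) else (hm.1, hm.2 + 1))
        else
          (if PySem.Set.contains pvTargetV t then (hm.1 + 1, hm.2) else (hm.1, hm.2 + 1)))
        ((0 : Int), (0 : Int))
      let s := hm.1 * 10 - hm.2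
      if s > best.2.2 then (sx, sy, s) else best) best) (0, 0, -1000000000)

-- ===== PORT B =====
def pvTargetHL : List (Int × Int) := [(0,7),(0,14),(16,0),(17,0),(18,0),(19,0),(16,2),(17,2),(18,2),(19,2)]
def pvTargetVL : List (Int × Int) := [(1,7),(16,0),(16,1),(18,0),(18,1),(20,0),(20,1)]

-- the candidate-shift tally ('counts' in Source B)
def pvCounts (added : List (String × Int × Int)) : PySem.Dict (Int × Int) Int :=
  added.foldl (fun d e =>
    (if e.1 == "h" then pvTargetHL else pvTargetVL).foldl (fun d t =>
      let sx := t.1 - e.2.1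
      let sy := t.2 - e.2.2
      if -30 ≤ sx ∧ sx ≤ 30 ∧ -30 ≤ sy ∧ sy ≤ 30 then
        d.insert (sx, sy) (d.getD (sx, sy) 0 + 1)
      else d) d) PySem.Dict.empty

def best_shift_alt (added : List (String × Int × Int)) : Int × Int × Int :=
  match PySem.List.max? (pvCounts added).values (fun v => v) with
  | none => (-30, -30, -(added.length : Int))   -- 'if not counts: return (-30, -30, -len(added))'
  | some h =>
    match PySem.List.min2? (((pvCounts added).items.filter (fun p => p.2 == h)).map (fun p => p.1))
        (fun k => k.1) (fun k => k.2) with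
    | none => (-30, -30, -(added.length : Int)) -- unreachable: counts is nonempty here
    | some m => (m.1, m.2, 11 * h - (added.length : Int))

-- ===== PRECONDITION & SPEC =====
-- Pre_ excludes only absurdly long inputs (≥ 10^9 elements), on which A's -10^9 sentinel can
-- exceed every real score 11*hit - len(added) so that A keeps the sentinel triple (0,0,-10^9),
-- an artefact of its initialisation that B does not reproduce.
def Pre_best_shift (added : List (String × Int × Int)) : Prop := added.length < 1000000000
instance (added : List (String × Int × Int)) : Decidable (Pre_best_shift added) := by
  unfold Pre_best_shift; infer_instance

def pvWitness_best_shift : (List (String × Int × Int)) := [("h", 16, 0)]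

def Spec_best_shift (added : List (String × Int × Int)) (out : Int × Int × Int) : Prop := out = best_shift_alt added
instance (added : List (String × Int × Int)) (out : Int × Int × Int) : Decidable (Spec_best_shift added out) := by unfold Spec_best_shift; infer_instance

-- ===== CLAIM (what is proved, stated in full; the proofs are below) =====
def Claim_equal_best_shift : Prop := ∀ (added : List (String × Int × Int)), Dom_best_shift added → Pre_best_shift added → Spec_best_shift added (best_shift added)

-- ===== LEMMAS AND PROOFS =====

-- the selected target list of an element's kind
def pvTgt (k : String) : List (Int × Int) := if k == "h" then pvTargetHL else pvTargetVL

-- number of elements of `added` that hit their target set under shift p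
def pvHit (added : List (String × Int × Int)) (p : Int × Int) : Nat :=
  added.countP (fun e => (pvTgt e.1).contains (e.2.1 + p.1, e.2.2 + p.2))

def pvScore (added : List (String × Int × Int)) (p : Int × Int) : Int :=
  11 * (pvHit added p : Int) - (added.length : Int)

def pvInR (p : Int × Int) : Prop := -30 ≤ p.1 ∧ p.1 ≤ 30 ∧ -30 ≤ p.2 ∧ p.2 ≤ 30

def pvGrid : List (Int × Int) :=
  (PySem.List.pyRange (-30) 31 1).flatMap (fun sx =>
    (PySem.List.pyRange (-30) 31 1).map (fun sy => (sx, sy)))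

def pvLexLE (a b : Int × Int) : Prop := a.1 < b.1 ∨ (a.1 = b.1 ∧ a.2 ≤ b.2)
def pvLexLT (a b : Int × Int) : Prop := a.1 < b.1 ∨ (a.1 = b.1 ∧ a.2 < b.2)

-- "r is the answer": r is on the grid, has maximal score, and is lex-least among maximal ones
def pvIsBest (added : List (String × Int × Int)) (r : Int × Int) : Prop :=
  r ∈ pvGrid ∧ (∀ p ∈ pvGrid, pvScore added p ≤ pvScore added r) ∧
    (∀ p ∈ pvGrid, pvScore added p = pvScore added r → pvLexLE r p)

lemma pv_lexLE_trans {a b c : Int × Int} (h1 : pvLexLE a b) (h2 : pvLexLE b c) : pvLexLE a c := by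
  unfold pvLexLE at *; omega

lemma pv_lexLE_of_LE_LT {a b c : Int × Int} (h1 : pvLexLE a b) (h2 : pvLexLT b c) : pvLexLE a c := by
  unfold pvLexLE pvLexLT at *; omega

lemma pv_best_unique {added : List (String × Int × Int)} {r1 r2 : Int × Int}
    (h1 : pvIsBest added r1) (h2 : pvIsBest added r2) : r1 = r2 := by
  obtain ⟨m1, mx1, f1⟩ := h1
  obtain ⟨m2, mx2, f2⟩ := h2
  have e1 : pvScore added r1 ≤ pvScore added r2 := mx2 r1 m1
  have e2 : pvScore added r2 ≤ pvScore added r1 := mx1 r2 m2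
  have l1 : pvLexLE r1 r2 := f1 r2 m2 (by omega)
  have l2 : pvLexLE r2 r1 := f2 r1 m1 (by omega)
  unfold pvLexLE at l1 l2
  have : r1.1 = r2.1 ∧ r1.2 = r2.2 := by omega
  exact Prod.ext this.1 this.2

lemma pv_mem_grid {p : Int × Int} : p ∈ pvGrid ↔ pvInR p := by
  unfold pvGrid pvInR
  simp only [List.mem_flatMap, List.mem_map, PySem.List.mem_pyRange_one]
  constructor
  · rintro ⟨sx, hsx, sy, hsy, rfl⟩; omega
  · rintro h; exact ⟨p.1, by omega, p.2, by omega, rfl⟩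

lemma pv_pairwise_flatMap (xs ys : List Int) (hx : xs.Pairwise (· < ·)) (hy : ys.Pairwise (· < ·)) :
    (xs.flatMap (fun x => ys.map (fun y => ((x, y) : Int × Int)))).Pairwise pvLexLT := by
  induction xs with
  | nil => simp
  | cons x xs ih =>
    rw [List.flatMap_cons, List.pairwise_append]
    refine ⟨?_, ih (List.Pairwise.of_cons hx), ?_⟩
    · rw [List.pairwise_map]
      exact hy.imp (fun h => Or.inr ⟨rfl, h⟩)
    · intro a ha b hb
      obtain ⟨y, _, rfl⟩ := List.mem_map.1 ha
      obtain ⟨x', hx', y', _, rfl⟩ := by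
        simpa only [List.mem_flatMap, List.mem_map] using hb
      exact Or.inl (List.rel_of_pairwise_cons hx hx')

lemma pv_grid_pairwise : pvGrid.Pairwise pvLexLT :=
  pv_pairwise_flatMap _ _ (PySem.List.pairwise_lt_pyRange_one _ _) (PySem.List.pairwise_lt_pyRange_one _ _)

lemma pv_grid_cons : ∃ T, pvGrid = ((-30 : Int), (-30 : Int)) :: T := by
  unfold pvGrid
  rw [PySem.List.pyRange_one_cons (by norm_num : (-30 : Int) < 31), List.flatMap_cons,
    List.map_cons, List.cons_append]
  exact ⟨_, rfl⟩

-- ---- A side ----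

lemma pv_hitmiss {α : Type} (P : α → Bool) :
    ∀ (l : List α) (a b : Int),
      l.foldl (fun hm e => if P e then (hm.1 + 1, hm.2) else (hm.1, hm.2 + 1)) (a, b)
        = (a + (l.countP P : Int), b + (l.countP (fun e => !P e) : Int)) := by
  intro l
  induction l with
  | nil => simp
  | cons e l ih =>
    intro a b
    simp only [List.foldl_cons]
    by_cases h : P e
    · rw [if_pos h, ih]
      have h1 : ((e :: l).countP P : Int) = (l.countP P : Int) + 1 := by
        simp [List.countP_cons, h]
      have h2 : ((e :: l).countP (fun x => !P x) : Int) = (l.countP (fun x => !P x) : Int) := by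
        simp [List.countP_cons, h]
      rw [h1, h2]
      refine Prod.ext ?_ ?_ <;> dsimp only <;> ring
    · rw [if_neg h, ih]
      have h1 : ((e :: l).countP P : Int) = (l.countP P : Int) := by
        simp [List.countP_cons, h]
      have h2 : ((e :: l).countP (fun x => !P x) : Int) = (l.countP (fun x => !P x) : Int) + 1 := by
        simp [List.countP_cons, h]
      rw [h1, h2]
      refine Prod.ext ?_ ?_ <;> dsimp only <;> ring

lemma pv_countP_not {α : Type} (P : α → Bool) (l : List α) :
    l.countP P + l.countP (fun e => !P e) = l.length := by
  induction l with
  | nil => simp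
  | cons e l ih => by_cases h : P e <;> simp [List.countP_cons, h] <;> omega

lemma pv_setH_eq : pvTargetH = pvTargetHL := by decide
lemma pv_setV_eq : pvTargetV = pvTargetVL := by decide

lemma pv_foldl_flatMap {γ : Type} (xs ys : List Int) (g : γ → (Int × Int) → γ) (init : γ) :
    xs.foldl (fun b x => ys.foldl (fun b y => g b (x, y)) b) init
      = (xs.flatMap (fun x => ys.map (fun y => ((x, y) : Int × Int)))).foldl g init := by
  induction xs generalizing init with
  | nil => simp
  | cons x xs ih => simp [List.flatMap_cons, List.foldl_append, List.foldl_map, ih]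

lemma pvA_inner (added : List (String × Int × Int)) (sx sy : Int) :
    added.foldl (fun hm e =>
      let t : Int × Int := (e.2.1 + sx, e.2.2 + sy)
      if e.1 == "h" then
        (if PySem.Set.contains pvTargetH t then (hm.1 + 1, hm.2) else (hm.1, hm.2 + 1))
      else
        (if PySem.Set.contains pvTargetV t then (hm.1 + 1, hm.2) else (hm.1, hm.2 + 1)))
      ((0 : Int), (0 : Int))
    = ((pvHit added (sx, sy) : Int), ((added.length - pvHit added (sx, sy) : Nat) : Int)) := by
  have hstep : (fun (hm : Int × Int) (e : String × Int × Int) =>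
      let t : Int × Int := (e.2.1 + sx, e.2.2 + sy)
      if e.1 == "h" then
        (if PySem.Set.contains pvTargetH t then (hm.1 + 1, hm.2) else (hm.1, hm.2 + 1))
      else
        (if PySem.Set.contains pvTargetV t then (hm.1 + 1, hm.2) else (hm.1, hm.2 + 1)))
    = (fun hm e => if (pvTgt e.1).contains (e.2.1 + (sx, sy).1, e.2.2 + (sx, sy).2) then
        (hm.1 + 1, hm.2) else (hm.1, hm.2 + 1)) := by
    funext hm e
    simp only [pvTgt, PySem.Set.contains, pv_setH_eq, pv_setV_eq]
    by_cases h : e.1 == "h" <;> simp [h]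
  rw [hstep, pv_hitmiss]
  have hcp := pv_countP_not (fun e : String × Int × Int =>
    (pvTgt e.1).contains (e.2.1 + (sx, sy).1, e.2.2 + (sx, sy).2)) added
  unfold pvHit
  dsimp only at hcp ⊢
  refine Prod.ext ?_ ?_ <;> dsimp only
  · ring
  · omega

lemma pvA_eq_gridfold (added : List (String × Int × Int)) :
    best_shift added = pvGrid.foldl
      (fun best p => if pvScore added p > best.2.2 then (p.1, p.2, pvScore added p) else best)
      (0, 0, -1000000000) := by
  unfold best_shift pvGrid
  rw [← pv_foldl_flatMap]
  have hbody : (fun (best : Int × Int × Int) (sx : Int) =>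
      (PySem.List.pyRange (-30) 31 1).foldl (fun best sy =>
        let hm : Int × Int := added.foldl (fun hm e =>
          let t : Int × Int := (e.2.1 + sx, e.2.2 + sy)
          if e.1 == "h" then
            (if PySem.Set.contains pvTargetH t then (hm.1 + 1, hm.2) else (hm.1, hm.2 + 1))
          else
            (if PySem.Set.contains pvTargetV t then (hm.1 + 1, hm.2) else (hm.1, hm.2 + 1)))
          ((0 : Int), (0 : Int))
        let s := hm.1 * 10 - hm.2
        if s > best.2.2 then (sx, sy, s) else best) best)
    = (fun best sx => (PySem.List.pyRange (-30) 31 1).foldl (fun best sy =>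
        if pvScore added (sx, sy) > best.2.2 then (sx, sy, pvScore added (sx, sy)) else best) best) := by
    funext best sx
    congr 1
    funext best sy
    rw [pvA_inner added sx sy]
    have hle : pvHit added (sx, sy) ≤ added.length := List.countP_le_length
    have hs : ((pvHit added (sx, sy) : Int), ((added.length - pvHit added (sx, sy) : Nat) : Int)).1 * 10
        - ((pvHit added (sx, sy) : Int), ((added.length - pvHit added (sx, sy) : Nat) : Int)).2
        = pvScore added (sx, sy) := by
      dsimp only
      unfold pvScore
      omega
    dsimp only
    rw [hs]
  rw [hbody]

lemma pv_fold_triple (added : List (String × Int × Int)) :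
    ∀ (L : List (Int × Int)) (q : Int × Int),
      L.foldl (fun best p => if pvScore added p > best.2.2 then (p.1, p.2, pvScore added p) else best)
          (q.1, q.2, pvScore added q)
        = (let r := L.foldl (fun b p => if pvScore added p > pvScore added b then p else b) q
           (r.1, r.2, pvScore added r)) := by
  intro L
  induction L with
  | nil => intro q; rfl
  | cons a L ih =>
    intro q
    simp only [List.foldl_cons]
    by_cases h : pvScore added a > pvScore added q
    · simp only [h, if_pos]
      exact ih a
    · simp only [if_neg h]
      exact ih q

lemma pv_pairfold_spec (added : List (String × Int × Int)) :
    ∀ (L : List (Int × Int)) (q : Int × Int), (q :: L).Pairwise pvLexLT →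
      (L.foldl (fun b p => if pvScore added p > pvScore added b then p else b) q) ∈ q :: L ∧
      (∀ p ∈ q :: L, pvScore added p
          ≤ pvScore added (L.foldl (fun b p => if pvScore added p > pvScore added b then p else b) q)) ∧
      (∀ p ∈ q :: L, pvScore added p
          = pvScore added (L.foldl (fun b p => if pvScore added p > pvScore added b then p else b) q)
          → pvLexLE (L.foldl (fun b p => if pvScore added p > pvScore added b then p else b) q) p) := by
  intro L
  induction L with
  | nil =>
    intro q _
    simp only [List.foldl_nil]
    refine ⟨List.mem_singleton_self q, ?_, ?_⟩
    · intro p hp; exact le_of_eq (by rw [List.mem_singleton.1 hp])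
    · intro p hp _; rw [List.mem_singleton.1 hp]; exact Or.inr ⟨rfl, le_refl _⟩
  | cons a L ih =>
    intro q hpw
    have hq_lt : ∀ z ∈ a :: L, pvLexLT q z := (List.pairwise_cons.1 hpw).1
    have hpw' : (a :: L).Pairwise pvLexLT := (List.pairwise_cons.1 hpw).2
    have ha_lt : ∀ z ∈ L, pvLexLT a z := (List.pairwise_cons.1 hpw').1
    simp only [List.foldl_cons]
    by_cases h : pvScore added a > pvScore added q
    · simp only [h, if_pos]
      have hpwa : (a :: L).Pairwise pvLexLT := hpw'
      obtain ⟨hmem, hmax, hfirst⟩ := ih a hpwa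
      refine ⟨?_, ?_, ?_⟩
      · exact List.mem_cons_of_mem q hmem
      · intro p hp
        rcases List.mem_cons.1 hp with rfl | hp'
        · exact le_trans (le_of_lt h) (hmax a (List.mem_cons_self))
        · exact hmax p hp'
      · intro p hp heq
        rcases List.mem_cons.1 hp with rfl | hp'
        · exfalso
          have := hmax a (List.mem_cons_self)
          omega
        · exact hfirst p hp' heq
    · simp only [if_neg h]
      have hpwq : (q :: L).Pairwise pvLexLT := by
        rw [List.pairwise_cons]
        exact ⟨fun z hz => hq_lt z (List.mem_cons_of_mem a hz), (List.pairwise_cons.1 hpw').2⟩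
      obtain ⟨hmem, hmax, hfirst⟩ := ih q hpwq
      refine ⟨?_, ?_, ?_⟩
      · rcases List.mem_cons.1 hmem with hm | hm
        · rw [hm]; exact List.mem_cons_self
        · exact List.mem_cons_of_mem q (List.mem_cons_of_mem a hm)
      · intro p hp
        rcases List.mem_cons.1 hp with rfl | hp'
        · exact hmax p List.mem_cons_self
        · rcases List.mem_cons.1 hp' with rfl | hp''
          · exact le_trans (not_lt.1 h) (hmax q List.mem_cons_self)
          · exact hmax p (List.mem_cons_of_mem q hp'')
      · intro p hp heq
        rcases List.mem_cons.1 hp with rfl | hp'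
        · exact hfirst p List.mem_cons_self heq
        · rcases List.mem_cons.1 hp' with rfl | hp''
          · -- p = a, not better than q
            have hq_le : pvScore added q
                ≤ pvScore added (L.foldl (fun b p => if pvScore added p > pvScore added b then p else b) q) :=
              hmax q List.mem_cons_self
            have : pvScore added q
                = pvScore added (L.foldl (fun b p => if pvScore added p > pvScore added b then p else b) q) := by
              omega
            have hrq := hfirst q List.mem_cons_self this
            exact pv_lexLE_of_LE_LT hrq (hq_lt p List.mem_cons_self)
          · exact hfirst p (List.mem_cons_of_mem q hp'') heq

lemma pvA_best (added : List (String × Int × Int)) (hpre : Pre_best_shift added) :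
    ∃ r, pvIsBest added r ∧ best_shift added = (r.1, r.2, pvScore added r) := by
  have hsc : ∀ p : Int × Int, -1000000000 < pvScore added p := by
    intro p
    unfold pvScore
    unfold Pre_best_shift at hpre
    omega
  obtain ⟨T, hT⟩ := pv_grid_cons
  rw [pvA_eq_gridfold, hT]
  rw [List.foldl_cons]
  have h0 : (if pvScore added ((-30 : Int), (-30 : Int)) > ((0 : Int), (0 : Int), (-1000000000 : Int)).2.2
      then (((-30 : Int), (-30 : Int)).1, ((-30 : Int), (-30 : Int)).2, pvScore added ((-30 : Int), (-30 : Int)))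
      else ((0 : Int), (0 : Int), (-1000000000 : Int)))
      = ((((-30 : Int), (-30 : Int)) : Int × Int).1, (((-30 : Int), (-30 : Int)) : Int × Int).2,
          pvScore added ((-30 : Int), (-30 : Int))) := by
    rw [if_pos (hsc _)]
  rw [h0, pv_fold_triple]
  have hpw : (((-30 : Int), (-30 : Int)) :: T).Pairwise pvLexLT := by
    rw [← hT]; exact pv_grid_pairwise
  obtain ⟨hmem, hmax, hfirst⟩ := pv_pairfold_spec added T ((-30 : Int), (-30 : Int)) hpw
  refine ⟨_, ⟨?_, ?_, ?_⟩, rfl⟩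
  · rw [hT]; exact hmem
  · intro p hp; exact hmax p (by rw [← hT]; exact hp)
  · intro p hp heq; exact hfirst p (by rw [← hT]; exact hp) heq

-- ---- B side ----

def pvStepT (e : String × Int × Int) (d : PySem.Dict (Int × Int) Int) (t : Int × Int) :
    PySem.Dict (Int × Int) Int :=
  if -30 ≤ t.1 - e.2.1 ∧ t.1 - e.2.1 ≤ 30 ∧ -30 ≤ t.2 - e.2.2 ∧ t.2 - e.2.2 ≤ 30 then
    d.insert (t.1 - e.2.1, t.2 - e.2.2) (d.getD (t.1 - e.2.1, t.2 - e.2.2) 0 + 1)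
  else d

def pvStepE (d : PySem.Dict (Int × Int) Int) (e : String × Int × Int) : PySem.Dict (Int × Int) Int :=
  (pvTgt e.1).foldl (pvStepT e) d

lemma pvCounts_eq (added : List (String × Int × Int)) :
    pvCounts added = added.foldl pvStepE PySem.Dict.empty := rfl

lemma pv_inner_getD (e : String × Int × Int) (p : Int × Int) (hp : pvInR p) :
    ∀ (T : List (Int × Int)) (d : PySem.Dict (Int × Int) Int),
      (T.foldl (pvStepT e) d).getD p 0
        = d.getD p 0 + (T.count (e.2.1 + p.1, e.2.2 + p.2) : Int) := by
  intro T
  induction T with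
  | nil => intro d; simp
  | cons t T ih =>
    intro d
    rw [List.foldl_cons, ih]
    have hstep : (pvStepT e d t).getD p 0
        = d.getD p 0 + (if t = (e.2.1 + p.1, e.2.2 + p.2) then 1 else 0) := by
      unfold pvStepT
      by_cases ht : t = (e.2.1 + p.1, e.2.2 + p.2)
      · rw [if_pos ht]
        have h1 := congrArg Prod.fst ht
        have h2 := congrArg Prod.snd ht
        dsimp only at h1 h2
        have hkey : ((t.1 - e.2.1 : Int), (t.2 - e.2.2 : Int)) = p :=
          Prod.ext (by omega) (by omega)
        unfold pvInR at hp
        rw [if_pos (by omega)]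
        rw [hkey, PySem.Dict.getD_insert_self]
      · rw [if_neg ht]
        have hne : p ≠ ((t.1 - e.2.1 : Int), (t.2 - e.2.2 : Int)) := by
          intro hkk
          apply ht
          have h1 := congrArg Prod.fst hkk
          have h2 := congrArg Prod.snd hkk
          dsimp only at h1 h2
          exact Prod.ext (by omega) (by omega)
        split
        · rw [PySem.Dict.getD_insert, if_neg hne]
          omega
        · omega
    rw [hstep]
    have hcc : (((t :: T).count (e.2.1 + p.1, e.2.2 + p.2) : Nat) : Int)
        = (T.count (e.2.1 + p.1, e.2.2 + p.2) : Int)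
          + (if t = (e.2.1 + p.1, e.2.2 + p.2) then 1 else 0) := by
      by_cases ht : t = (e.2.1 + p.1, e.2.2 + p.2)
      · simp [List.count_cons, ht]
      · simp [List.count_cons, ht]
    rw [hcc]
    omega

lemma pv_count_nodup :
    ∀ (l : List (Int × Int)), l.Nodup → ∀ c, l.count c = if c ∈ l then 1 else 0 := by
  intro l
  induction l with
  | nil => simp
  | cons a l ih =>
    intro h c
    obtain ⟨ha, hl⟩ := List.nodup_cons.1 h
    rw [List.count_cons, ih hl c]
    by_cases hc : c = a
    · subst hc; simp [ha]
    · simp [hc, Ne.symm hc]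

lemma pv_tgt_count (k : String) (c : Int × Int) :
    (pvTgt k).count c = if (pvTgt k).contains c then 1 else 0 := by
  have hnd : (pvTgt k).Nodup := by unfold pvTgt; split <;> decide
  rw [pv_count_nodup _ hnd c]
  by_cases h : c ∈ pvTgt k
  · rw [if_pos h, if_pos (List.contains_iff_mem.2 h)]
  · rw [if_neg h, if_neg (fun hc => h (List.contains_iff_mem.1 hc))]

lemma pvCounts_getD_aux (p : Int × Int) (hp : pvInR p) :
    ∀ (added : List (String × Int × Int)) (d : PySem.Dict (Int × Int) Int),
      (added.foldl pvStepE d).getD p 0 = d.getD p 0 + (pvHit added p : Int) := by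
  intro added
  induction added with
  | nil => intro d; simp [pvHit]
  | cons e added ih =>
    intro d
    rw [List.foldl_cons, ih]
    unfold pvStepE
    rw [pv_inner_getD e p hp, pv_tgt_count]
    unfold pvHit
    rw [List.countP_cons]
    by_cases h : (pvTgt e.1).contains (e.2.1 + p.1, e.2.2 + p.2)
    · rw [if_pos h]
      push_cast
      ring
    · rw [if_neg h]
      push_cast
      ring

lemma pvCounts_getD (added : List (String × Int × Int)) (p : Int × Int) (hp : pvInR p) :
    (pvCounts added).getD p 0 = (pvHit added p : Int) := by
  rw [pvCounts_eq, pvCounts_getD_aux p hp added PySem.Dict.empty]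
  simp [PySem.Dict.getD_empty]

lemma pv_stepT_keys (e : String × Int × Int) (d : PySem.Dict (Int × Int) Int) (t : Int × Int)
    (h : ∀ p ∈ d.keys, pvInR p) : ∀ p ∈ (pvStepT e d t).keys, pvInR p := by
  unfold pvStepT
  split
  · intro p hp
    rcases (PySem.Dict.mem_keys_insert _ _ _ _).1 hp with rfl | hp'
    · unfold pvInR; simp; omega
    · exact h p hp'
  · exact h

lemma pv_stepT_nodup (e : String × Int × Int) (d : PySem.Dict (Int × Int) Int) (t : Int × Int)
    (h : d.keys.Nodup) : (pvStepT e d t).keys.Nodup := by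
  unfold pvStepT
  split
  · exact PySem.Dict.nodup_keys_insert _ _ _ h
  · exact h

lemma pv_getD_nonneg (d : PySem.Dict (Int × Int) Int) (hv : ∀ v ∈ d.values, 1 ≤ v) (p : Int × Int) :
    0 ≤ d.getD p 0 := by
  rw [PySem.Dict.getD_eq_get?_getD]
  cases hg : d.get? p with
  | none => simp
  | some v =>
    have : v ∈ d.values := by
      have := PySem.Dict.mem_items_of_get?_eq_some d hg
      exact List.mem_map_of_mem this
    have := hv v this
    simp; omega

lemma pv_stepT_values (e : String × Int × Int) (d : PySem.Dict (Int × Int) Int) (t : Int × Int)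
    (h : ∀ v ∈ d.values, 1 ≤ v) : ∀ v ∈ (pvStepT e d t).values, 1 ≤ v := by
  unfold pvStepT
  split
  · intro v hv
    rcases PySem.Dict.mem_values_insert _ _ _ _ hv with rfl | hv'
    · have := pv_getD_nonneg d h (t.1 - e.2.1, t.2 - e.2.2)
      omega
    · exact h v hv'
  · exact h

-- A Dict invariant preserved by pvStepT is preserved by pvCounts
lemma pv_fold_inv (C : PySem.Dict (Int × Int) Int → Prop)
    (hstep : ∀ e d t, C d → C (pvStepT e d t)) :
    ∀ (added : List (String × Int × Int)) (d : PySem.Dict (Int × Int) Int),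
      C d → C (added.foldl pvStepE d) := by
  intro added
  induction added with
  | nil => intro d h; exact h
  | cons e added ih =>
    intro d h
    rw [List.foldl_cons]
    apply ih
    unfold pvStepE
    generalize pvTgt e.1 = T
    induction T generalizing d with
    | nil => exact h
    | cons t T ihT => rw [List.foldl_cons]; exact ihT _ (hstep e d t h)

lemma pvCounts_inv (C : PySem.Dict (Int × Int) Int → Prop)
    (hstep : ∀ e d t, C d → C (pvStepT e d t)) (added : List (String × Int × Int))
    (h0 : C PySem.Dict.empty) : C (pvCounts added) := by
  rw [pvCounts_eq]
  exact pv_fold_inv C hstep added PySem.Dict.empty h0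

lemma pvCounts_keys_inR (added : List (String × Int × Int)) :
    ∀ p ∈ (pvCounts added).keys, pvInR p := by
  refine pvCounts_inv (fun d => ∀ p ∈ d.keys, pvInR p) (fun e d t h => pv_stepT_keys e d t h) added ?_
  simp [PySem.Dict.keys_empty]

lemma pvCounts_keys_nodup (added : List (String × Int × Int)) : (pvCounts added).keys.Nodup := by
  refine pvCounts_inv (fun d => d.keys.Nodup) (fun e d t h => pv_stepT_nodup e d t h) added ?_
  simp [PySem.Dict.keys_empty]

lemma pvCounts_values_pos (added : List (String × Int × Int)) :
    ∀ v ∈ (pvCounts added).values, 1 ≤ v := by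
  refine pvCounts_inv (fun d => ∀ v ∈ d.values, 1 ≤ v) (fun e d t h => pv_stepT_values e d t h) added ?_
  intro v hv
  have : (PySem.Dict.empty : PySem.Dict (Int × Int) Int).values = [] := rfl
  rw [this] at hv
  simp at hv

-- min2? on pairs of ints: first lexicographic minimum
def pvMinStep (acc : Option (Int × Int)) (x : Int × Int) : Option (Int × Int) :=
  match acc with
  | none => some x
  | some mm =>
    if (decide (x.1 < mm.1) || (!decide (mm.1 < x.1) && decide (x.2 < mm.2))) = true
    then some x else some mm

lemma pv_min2_aux (xs : List (Int × Int)) :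
    ∀ (a m : Int × Int), xs.foldl pvMinStep (some a) = some m →
      (m = a ∨ m ∈ xs) ∧ pvLexLE m a ∧ ∀ y ∈ xs, pvLexLE m y := by
  induction xs with
  | nil =>
    intro a m h
    simp only [List.foldl_nil, Option.some.injEq] at h
    exact ⟨Or.inl h.symm, by subst h; exact Or.inr ⟨rfl, le_refl _⟩, by simp⟩
  | cons x xs ih =>
    intro a m h
    rw [List.foldl_cons] at h
    by_cases hc : (decide (x.1 < a.1) || (!decide (a.1 < x.1) && decide (x.2 < a.2))) = true
    · rw [show pvMinStep (some a) x = some x by dsimp only [pvMinStep]; rw [if_pos hc]] at h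
      obtain ⟨hmem, hle, hall⟩ := ih x m h
      have hxa : pvLexLT x a := by
        simp only [Bool.or_eq_true, Bool.and_eq_true, Bool.not_eq_true', decide_eq_true_eq,
          decide_eq_false_iff_not] at hc
        unfold pvLexLT; omega
      refine ⟨?_, pv_lexLE_of_LE_LT hle hxa, ?_⟩
      · rcases hmem with rfl | hm
        · exact Or.inr List.mem_cons_self
        · exact Or.inr (List.mem_cons_of_mem x hm)
      · intro y hy
        rcases List.mem_cons.1 hy with rfl | hy'
        · exact hle
        · exact hall y hy'
    · rw [show pvMinStep (some a) x = some a by dsimp only [pvMinStep]; rw [if_neg hc]] at h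
      obtain ⟨hmem, hle, hall⟩ := ih a m h
      have hax : pvLexLE a x := by
        simp only [Bool.or_eq_true, Bool.and_eq_true, Bool.not_eq_true', decide_eq_true_eq,
          decide_eq_false_iff_not] at hc
        unfold pvLexLE; omega
      refine ⟨?_, hle, ?_⟩
      · rcases hmem with rfl | hm
        · exact Or.inl rfl
        · exact Or.inr (List.mem_cons_of_mem x hm)
      · intro y hy
        rcases List.mem_cons.1 hy with rfl | hy'
        · exact pv_lexLE_trans hle hax
        · exact hall y hy'

lemma pv_min2_eq (xs : List (Int × Int)) :
    PySem.List.min2? xs (fun k => k.1) (fun k => k.2) = xs.foldl pvMinStep none := by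
  unfold PySem.List.min2?
  congr 1
  funext acc x
  cases acc <;> rfl

lemma pv_min2_spec (xs : List (Int × Int)) (m : Int × Int)
    (h : PySem.List.min2? xs (fun k => k.1) (fun k => k.2) = some m) :
    m ∈ xs ∧ ∀ y ∈ xs, pvLexLE m y := by
  rw [pv_min2_eq] at h
  cases xs with
  | nil => simp at h
  | cons x xs =>
    rw [List.foldl_cons, show pvMinStep none x = some x from rfl] at h
    have h' : xs.foldl pvMinStep (some x) = some m := h
    obtain ⟨hmem, hle, hall⟩ := pv_min2_aux xs x m h'
    refine ⟨?_, ?_⟩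
    · rcases hmem with rfl | hm
      · exact List.mem_cons_self
      · exact List.mem_cons_of_mem x hm
    · intro y hy
      rcases List.mem_cons.1 hy with rfl | hy'
      · exact hle
      · exact hall y hy'

lemma pv_min2_isSome_aux (xs : List (Int × Int)) :
    ∀ a, ∃ m, xs.foldl pvMinStep (some a) = some m := by
  induction xs with
  | nil => exact fun a => ⟨a, rfl⟩
  | cons x xs ih =>
    intro a
    rw [List.foldl_cons]
    by_cases hc : (decide (x.1 < a.1) || (!decide (a.1 < x.1) && decide (x.2 < a.2))) = true
    · rw [show pvMinStep (some a) x = some x by dsimp only [pvMinStep]; rw [if_pos hc]]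
      exact ih x
    · rw [show pvMinStep (some a) x = some a by dsimp only [pvMinStep]; rw [if_neg hc]]
      exact ih a

lemma pv_min2_isSome (xs : List (Int × Int)) (hne : xs ≠ []) :
    ∃ m, PySem.List.min2? xs (fun k => k.1) (fun k => k.2) = some m := by
  cases xs with
  | nil => exact absurd rfl hne
  | cons x xs =>
    obtain ⟨m, hm⟩ := pv_min2_isSome_aux xs x
    refine ⟨m, ?_⟩
    rw [pv_min2_eq, List.foldl_cons, show pvMinStep none x = some x from rfl]
    exact hm

lemma pvB_best (added : List (String × Int × Int)) :
    ∃ r, pvIsBest added r ∧ best_shift_alt added = (r.1, r.2, pvScore added r) := by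
  have hnodup := pvCounts_keys_nodup added
  have hkeysR := pvCounts_keys_inR added
  have hvpos := pvCounts_values_pos added
  unfold best_shift_alt
  cases hmx : PySem.List.max? (pvCounts added).values (fun v => v) with
  | none =>
    have hvals : (pvCounts added).values = [] := (PySem.List.max?_eq_none_iff _ _).1 hmx
    have hitems : (pvCounts added).items = [] := by
      have : (pvCounts added).items.map (fun p => p.2) = [] := hvals
      exact List.map_eq_nil_iff.1 this
    have hempty : pvCounts added = PySem.Dict.empty := by
      apply PySem.Dict.ext
      rw [hitems]
      rfl
    have hhit : ∀ p : Int × Int, pvInR p → pvHit added p = 0 := by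
      intro p hp
      have := pvCounts_getD added p hp
      rw [hempty] at this
      simp [PySem.Dict.getD_empty] at this
      omega
    refine ⟨((-30 : Int), (-30 : Int)), ⟨?_, ?_, ?_⟩, ?_⟩
    · rw [pv_mem_grid]; unfold pvInR; norm_num
    · intro p hp
      rw [pv_mem_grid] at hp
      unfold pvScore
      rw [hhit p hp, hhit ((-30 : Int), (-30 : Int)) (by unfold pvInR; norm_num)]
    · intro p hp _
      rw [pv_mem_grid] at hp
      unfold pvInR at hp
      unfold pvLexLE
      omega
    · dsimp only
      unfold pvScore
      rw [hhit ((-30 : Int), (-30 : Int)) (by unfold pvInR; norm_num)]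
      norm_num
  | some h =>
    have hmem_h : h ∈ (pvCounts added).values := PySem.List.max?_mem hmx
    have hmax_h : ∀ v ∈ (pvCounts added).values, v ≤ h := by
      intro v hv
      exact PySem.List.max?_isMax hmx v hv
    have h1 : 1 ≤ h := hvpos h hmem_h
    -- the filtered key list is nonempty
    obtain ⟨q, hq_mem, hq2⟩ := List.mem_map.1 hmem_h
    have hq_filter : q ∈ (pvCounts added).items.filter (fun p => p.2 == h) := by
      rw [List.mem_filter]
      exact ⟨hq_mem, by simp [hq2]⟩
    have hFne : ((pvCounts added).items.filter (fun p => p.2 == h)).map (fun p => p.1) ≠ [] := by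
      intro hF
      rw [List.map_eq_nil_iff] at hF
      rw [hF] at hq_filter
      simp at hq_filter
    obtain ⟨m, hm⟩ := pv_min2_isSome _ hFne
    dsimp only
    rw [hm]
    obtain ⟨hm_mem, hm_min⟩ := pv_min2_spec _ m hm
    obtain ⟨qm, hqm_mem, hqm1⟩ := List.mem_map.1 hm_mem
    rw [List.mem_filter] at hqm_mem
    have hqm2 : qm.2 = h := by simpa using hqm_mem.2
    have hqm_items : (m, h) ∈ (pvCounts added).items := by
      have : qm = (m, h) := by
        apply Prod.ext
        · exact hqm1
        · exact hqm2
      rw [← this]; exact hqm_mem.1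
    have hm_keys : m ∈ (pvCounts added).keys := PySem.Dict.mem_keys_of_mem_items _ hqm_items
    have hmR : pvInR m := hkeysR m hm_keys
    have hm_getD : (pvCounts added).getD m 0 = h := PySem.Dict.getD_of_mem_items _ hqm_items hnodup 0
    have hm_hit : (pvHit added m : Int) = h := by
      rw [← pvCounts_getD added m hmR, hm_getD]
    have hgetD_le : ∀ p : Int × Int, pvInR p → (pvHit added p : Int) ≤ h := by
      intro p hp
      rw [← pvCounts_getD added p hp]
      by_cases hc : (pvCounts added).contains p
      · have hpk : p ∈ (pvCounts added).keys := (PySem.Dict.contains_iff_mem_keys _ _).1 hc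
        have : (pvCounts added).getD p 0 ∈ (pvCounts added).values := by
          rw [PySem.Dict.values_eq_map_keys _ hnodup 0]
          exact List.mem_map_of_mem hpk
        exact hmax_h _ this
      · rw [PySem.Dict.getD_of_not_contains _ 0 (by simpa using hc)]
        omega
    refine ⟨m, ⟨?_, ?_, ?_⟩, ?_⟩
    · rw [pv_mem_grid]; exact hmR
    · intro p hp
      rw [pv_mem_grid] at hp
      have := hgetD_le p hp
      unfold pvScore
      omega
    · intro p hp heq
      rw [pv_mem_grid] at hp
      have hphit : (pvHit added p : Int) = h := by
        unfold pvScore at heq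
        omega
      have hp_keys : p ∈ (pvCounts added).keys := by
        by_contra hcon
        have hc : ¬ (pvCounts added).contains p = true := fun hc =>
          hcon ((PySem.Dict.contains_iff_mem_keys _ _).1 hc)
        have := pvCounts_getD added p hp
        rw [PySem.Dict.getD_of_not_contains _ 0 (by simpa using hc)] at this
        omega
      have hp_items : (p, h) ∈ (pvCounts added).items := by
        have hg : (pvCounts added).getD p 0 = h := by
          rw [pvCounts_getD added p hp]; exact hphit
        have : (pvCounts added).items = (pvCounts added).keys.map
            (fun k => (k, (pvCounts added).getD k 0)) := PySem.Dict.items_eq_map_keys _ hnodup 0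
        rw [this]
        rw [← hg]
        exact List.mem_map_of_mem hp_keys
      have hpF : p ∈ ((pvCounts added).items.filter (fun p => p.2 == h)).map (fun p => p.1) := by
        apply List.mem_map.2
        exact ⟨(p, h), List.mem_filter.2 ⟨hp_items, by simp⟩, rfl⟩
      exact hm_min p hpF
    · have : pvScore added m = 11 * h - (added.length : Int) := by
        unfold pvScore; omega
      rw [this]

-- ===== VERDICT (by name: the statement is the Claim_ definition above) =====
theorem best_shift_spec : Claim_equal_best_shift := by
  intro added _ hpre
  obtain ⟨r1, hb1, he1⟩ := pvA_best added hpre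
  obtain ⟨r2, hb2, he2⟩ := pvB_best added
  unfold Spec_best_shift
  rw [he1, he2, pv_best_unique hb1 hb2]
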